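-- pv_equiv track=rewrite | github.com/adcosta17/Retrotransposon-insert-detection | scripts/get_polymorphic_somrit.py | check_nearby
-- ===== SOURCE A (Python) =====
-- def check_nearby(chrom, start, end, seen):
--     ret = {}
--     if chrom not in seen:
--         return False
--     i = start
--     while i < end:
--         if i in seen[chrom]["start"]:
--             ret[seen[chrom]["start"][i]] = 1
--         if i in seen[chrom]["end"]:
--             ret[seen[chrom]["end"][i]] = 1
--         i+=1
--     if len(ret) > 0:
--         return True
--     # May be spanning within a block
--     for item in seen[chrom]["start"]:
--         if item <= start and seen[chrom]["start"][item] >= end: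
--             ret[seen[chrom]["start"][item]] = 1
--         if item >= start and seen[chrom]["start"][item] <= end:
--             ret[seen[chrom]["start"][item]] = 1
--     if len(ret) > 0:
--         return True
--     return False
-- ===== SOURCE B (Python) =====
-- def check_nearby(chrom, start, end, seen):
--     # One pass over the stored dict entries instead of scanning every position in [start, end).
--     if chrom not in seen:
--         return False
--     blocks = seen[chrom]
--     starts = blocks["start"]
--     ends = blocks["end"]
--     for k, v in starts.items():
--         if start <= k < end:
--             return True
--         if (k <= start and v >= end) or (k >= start and v <= end):
--             return True
--     for k in ends:
--         if start <= k < end: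
--             return True
--     return False
-- ===== Notes on version B (the rewrite author's own statement) =====
-- stated objective: alternative
-- what changed: B replaces A's position-by-position scan of every integer in [start, end) against the two dicts (plus a second full pass over the start dict) with a single pass over the stored dict entries, testing range membership and block-spanning per entry; Pre_ excludes inputs where a present chrom entry lacks a 'start' or 'end' key (A raises KeyError there when start < end; when start >= end and only 'end' is missing A returns False while B still looks it up and raises), and association lists with duplicated keys inside one dict, which no real Python dict can produce.
-- outside the precondition, e.g. on check_nearby('c', 0, 0, {'c': {'start': {}}}): A returns False, B raises KeyError
import Mathlib
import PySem

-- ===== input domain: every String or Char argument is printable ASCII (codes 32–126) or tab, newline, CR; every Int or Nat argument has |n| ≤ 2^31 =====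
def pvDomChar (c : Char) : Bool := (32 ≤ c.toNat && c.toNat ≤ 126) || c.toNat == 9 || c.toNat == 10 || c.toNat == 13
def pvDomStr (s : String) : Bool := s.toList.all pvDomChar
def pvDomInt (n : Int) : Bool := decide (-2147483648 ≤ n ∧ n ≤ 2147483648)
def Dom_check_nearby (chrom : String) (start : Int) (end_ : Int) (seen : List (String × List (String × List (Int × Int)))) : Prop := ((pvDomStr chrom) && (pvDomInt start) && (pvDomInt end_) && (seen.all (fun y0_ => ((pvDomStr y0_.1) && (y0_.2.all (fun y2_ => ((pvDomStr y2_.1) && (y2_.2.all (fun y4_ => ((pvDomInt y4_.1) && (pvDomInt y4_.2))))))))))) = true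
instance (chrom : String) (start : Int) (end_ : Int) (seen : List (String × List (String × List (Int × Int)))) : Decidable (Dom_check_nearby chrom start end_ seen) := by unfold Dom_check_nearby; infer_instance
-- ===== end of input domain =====

-- B replaces A's scan of every integer position in [start, end) by a single pass over the stored
-- dict entries; equivalence is proved on Pre_ (chrom's entry has "start"/"end" keys, no duplicate keys).


-- ===== PORT A =====
-- the 'while i < end' loop of A: tests each position i against both dicts, marking hits in ret
def cnWhile (sd ed : PySem.Dict Int Int) (i end_ : Int) (ret : PySem.Dict Int Int) : PySem.Dict Int Int :=
  if i < end_ then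
    let r1 := if sd.contains i then ret.insert (sd.getD i 0) 1 else ret
    let r2 := if ed.contains i then r1.insert (ed.getD i 0) 1 else r1
    cnWhile sd ed (i + 1) end_ r2
  else ret
termination_by (end_ - i).toNat
decreasing_by omega

def check_nearby (chrom : String) (start : Int) (end_ : Int) (seen : List (String × List (String × List (Int × Int)))) : Bool :=
  match (PySem.Dict.mk seen).get? chrom with
  | none => false
  | some blocks =>
    let sd : PySem.Dict Int Int := PySem.Dict.mk ((PySem.Dict.mk blocks).getD "start" [])
    let ed : PySem.Dict Int Int := PySem.Dict.mk ((PySem.Dict.mk blocks).getD "end" [])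
    let ret := cnWhile sd ed start end_ PySem.Dict.empty
    if ret.size > 0 then true
    else
      -- 'for item in seen[chrom]["start"]' spanning loop
      let ret2 := sd.keys.foldl (fun r k =>
        let r1 := if k ≤ start ∧ sd.getD k 0 ≥ end_ then r.insert (sd.getD k 0) 1 else r
        if k ≥ start ∧ sd.getD k 0 ≤ end_ then r1.insert (sd.getD k 0) 1 else r1) ret
      if ret2.size > 0 then true else false

-- ===== PORT B =====
def check_nearby_alt (chrom : String) (start : Int) (end_ : Int) (seen : List (String × List (String × List (Int × Int)))) : Bool :=
  match (PySem.Dict.mk seen).get? chrom with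
  | none => false
  | some blocks =>
    let sd : PySem.Dict Int Int := PySem.Dict.mk ((PySem.Dict.mk blocks).getD "start" [])
    let ed : PySem.Dict Int Int := PySem.Dict.mk ((PySem.Dict.mk blocks).getD "end" [])
    (sd.items.any (fun kv =>
        decide (start ≤ kv.1 ∧ kv.1 < end_) ||
        decide ((kv.1 ≤ start ∧ kv.2 ≥ end_) ∨ (kv.1 ≥ start ∧ kv.2 ≤ end_)))) ||
    ed.keys.any (fun k => decide (start ≤ k ∧ k < end_))

-- ===== PRECONDITION & SPEC =====
-- Pre_ excludes inputs where the entry for chrom lacks a "start" or "end" key (Python A raises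
-- KeyError when start < end, and when start >= end with only "end" missing A returns False while
-- B's lookup of "end" raises), and association lists whose "start" member has duplicate keys,
-- which cannot arise from a real Python dict.
def Pre_check_nearby (chrom : String) (start : Int) (end_ : Int) (seen : List (String × List (String × List (Int × Int)))) : Prop :=
  (PySem.Dict.mk seen).contains chrom = true →
    ((PySem.Dict.mk ((PySem.Dict.mk seen).getD chrom [])).contains "start" = true ∧
     (PySem.Dict.mk ((PySem.Dict.mk seen).getD chrom [])).contains "end" = true ∧
     (PySem.Dict.mk ((PySem.Dict.mk ((PySem.Dict.mk seen).getD chrom [])).getD "start" [])).keys.Nodup)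
instance (chrom : String) (start : Int) (end_ : Int) (seen : List (String × List (String × List (Int × Int)))) : Decidable (Pre_check_nearby chrom start end_ seen) := by unfold Pre_check_nearby; infer_instance
def pvWitness_check_nearby : String × Int × Int × (List (String × List (String × List (Int × Int)))) :=
  ("c", 0, 2, [("c", [("start", [(0, 5)]), ("end", [(3, 4)])])])

def Spec_check_nearby (chrom : String) (start : Int) (end_ : Int) (seen : List (String × List (String × List (Int × Int)))) (out : Bool) : Prop := out = check_nearby_alt chrom start end_ seen
instance (chrom : String) (start : Int) (end_ : Int) (seen : List (String × List (String × List (Int × Int)))) (out : Bool) : Decidable (Spec_check_nearby chrom start end_ seen out) := by unfold Spec_check_nearby; infer_instance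

-- ===== CLAIM (what is proved, stated in full; the proofs are below) =====
def Claim_equal_check_nearby : Prop := ∀ (chrom : String) (start : Int) (end_ : Int) (seen : List (String × List (String × List (Int × Int)))), Dom_check_nearby chrom start end_ seen → Pre_check_nearby chrom start end_ seen → Spec_check_nearby chrom start end_ seen (check_nearby chrom start end_ seen)

-- ===== LEMMAS AND PROOFS =====

lemma dict_insert_size_pos (d : PySem.Dict Int Int) (k v : Int) : 0 < (d.insert k v).size := by
  have h : k ∈ (d.insert k v).keys :=
    (PySem.Dict.contains_iff_mem_keys _ _).mp (PySem.Dict.contains_insert_self d k v)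
  have : (d.insert k v).keys ≠ [] := List.ne_nil_of_mem h
  simpa [PySem.Dict.keys, PySem.Dict.size, List.length_pos_iff] using this

-- the while loop produces a nonempty ret exactly when some stored endpoint lies in [i, end_)
lemma cnWhile_size_pos (sd ed : PySem.Dict Int Int) (i end_ : Int) (ret : PySem.Dict Int Int) :
    0 < (cnWhile sd ed i end_ ret).size ↔
      0 < ret.size ∨ ∃ k, (k ∈ sd.keys ∨ k ∈ ed.keys) ∧ i ≤ k ∧ k < end_ := by
  fun_induction cnWhile sd ed i end_ ret with
  | case1 i ret h r1 r2 ih =>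
    rw [ih]
    by_cases hs : sd.contains i = true <;> by_cases he : ed.contains i = true <;>
      simp only [r1, r2, hs, he, Bool.false_eq_true, dite_false, dif_pos]
    · constructor
      · intro _; right; exact ⟨i, Or.inl ((PySem.Dict.contains_iff_mem_keys _ _).mp hs), le_refl _, h⟩
      · intro _; left; exact dict_insert_size_pos _ _ _
    · constructor
      · intro _; right; exact ⟨i, Or.inl ((PySem.Dict.contains_iff_mem_keys _ _).mp hs), le_refl _, h⟩
      · intro _; left; exact dict_insert_size_pos _ _ _
    · constructor
      · intro _; right; exact ⟨i, Or.inr ((PySem.Dict.contains_iff_mem_keys _ _).mp he), le_refl _, h⟩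
      · intro _; left; exact dict_insert_size_pos _ _ _
    · have hs' := fun hm => hs ((PySem.Dict.contains_iff_mem_keys sd i).mpr hm)
      have he' := fun hm => he ((PySem.Dict.contains_iff_mem_keys ed i).mpr hm)
      constructor
      · rintro (hr | ⟨k, hk, h1, h2⟩)
        · exact Or.inl hr
        · exact Or.inr ⟨k, hk, by omega, h2⟩
      · rintro (hr | ⟨k, hk, h1, h2⟩)
        · exact Or.inl hr
        · refine Or.inr ⟨k, hk, ?_, h2⟩
          rcases eq_or_ne k i with rfl | hne
          · cases hk with
            | inl hm => exact absurd hm hs'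
            | inr hm => exact absurd hm he'
          · omega
  | case2 i ret h =>
    constructor
    · exact Or.inl
    · rintro (hr | ⟨k, _, h1, h2⟩)
      · exact hr
      · omega

-- the spanning loop produces a nonempty ret exactly when some start entry spans the query
lemma span_foldl_size_pos (sd : PySem.Dict Int Int) (start end_ : Int)
    (ks : List Int) (ret : PySem.Dict Int Int) :
    0 < (ks.foldl (fun r k =>
        let r1 := if k ≤ start ∧ sd.getD k 0 ≥ end_ then r.insert (sd.getD k 0) 1 else r
        if k ≥ start ∧ sd.getD k 0 ≤ end_ then r1.insert (sd.getD k 0) 1 else r1) ret).size ↔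
      0 < ret.size ∨ ∃ k ∈ ks, (k ≤ start ∧ sd.getD k 0 ≥ end_) ∨ (k ≥ start ∧ sd.getD k 0 ≤ end_) := by
  induction ks generalizing ret with
  | nil => simp
  | cons k ks ih =>
    simp only [List.foldl_cons]
    rw [ih]
    by_cases h1 : k ≤ start ∧ sd.getD k 0 ≥ end_ <;> by_cases h2 : k ≥ start ∧ sd.getD k 0 ≤ end_ <;>
      simp only [h1, h2] <;> simp only [List.mem_cons]
    · constructor
      · intro _; right; exact ⟨k, Or.inl rfl, Or.inl h1⟩
      · intro _; left; exact dict_insert_size_pos _ _ _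
    · constructor
      · intro _; right; exact ⟨k, Or.inl rfl, Or.inl h1⟩
      · intro _; left; exact dict_insert_size_pos _ _ _
    · constructor
      · intro _; right; exact ⟨k, Or.inl rfl, Or.inr h2⟩
      · intro _; left; exact dict_insert_size_pos _ _ _
    · constructor
      · rintro (hr | ⟨j, hj, hsp⟩)
        · exact Or.inl hr
        · exact Or.inr ⟨j, Or.inr hj, hsp⟩
      · rintro (hr | ⟨j, rfl | hj, hsp⟩)
        · exact Or.inl hr
        · rcases hsp with hsp | hsp
          · exact absurd hsp h1
          · exact absurd hsp h2
        · exact Or.inr ⟨j, hj, hsp⟩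

theorem check_nearby_eq_alt (chrom : String) (start : Int) (end_ : Int)
    (seen : List (String × List (String × List (Int × Int))))
    (hnd : ((PySem.Dict.mk seen).get? chrom).elim True
      (fun blocks => (PySem.Dict.mk ((PySem.Dict.mk blocks).getD "start" [])).keys.Nodup)) :
    check_nearby chrom start end_ seen = check_nearby_alt chrom start end_ seen := by
  cases hc : (PySem.Dict.mk seen).get? chrom with
  | none => simp [check_nearby, check_nearby_alt, hc]
  | some blocks =>
    rw [hc] at hnd
    simp only [Option.elim] at hnd
    simp only [check_nearby, check_nearby_alt, hc, gt_iff_lt]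
    set sd : PySem.Dict Int Int := PySem.Dict.mk ((PySem.Dict.mk blocks).getD "start" []) with hsd
    set ed : PySem.Dict Int Int := PySem.Dict.mk ((PySem.Dict.mk blocks).getD "end" []) with hed
    rw [Bool.eq_iff_iff]
    constructor
    · intro hA
      split_ifs at hA with hW hS
      · rw [cnWhile_size_pos] at hW
        rcases hW with hW | ⟨k, hk | hk, h1, h2⟩
        · simp [PySem.Dict.size_empty] at hW
        · rcases List.mem_map.mp hk with ⟨⟨k, v⟩, hkv, rfl⟩
          simp only [List.any_eq_true, Bool.or_eq_true]
          exact Or.inl ⟨(k, v), hkv, Or.inl (decide_eq_true ⟨h1, h2⟩)⟩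
        · simp only [List.any_eq_true, Bool.or_eq_true]
          exact Or.inr ⟨k, hk, decide_eq_true ⟨h1, h2⟩⟩
      · rw [span_foldl_size_pos] at hS
        rcases hS with hS | ⟨k, hk, hsp⟩
        · exact absurd hS hW
        · rcases List.mem_map.mp hk with ⟨⟨k, v⟩, hkv, rfl⟩
          have hv : sd.getD k 0 = v := PySem.Dict.getD_of_mem_items sd hkv hnd 0
          rw [hv] at hsp
          simp only [List.any_eq_true, Bool.or_eq_true]
          exact Or.inl ⟨(k, v), hkv, Or.inr (decide_eq_true hsp)⟩
    · intro hB
      simp only [List.any_eq_true, Bool.or_eq_true, decide_eq_true_eq] at hB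
      have key : (0 < (cnWhile sd ed start end_ PySem.Dict.empty).size) ∨
          (∃ k ∈ sd.keys, (k ≤ start ∧ sd.getD k 0 ≥ end_) ∨ (k ≥ start ∧ sd.getD k 0 ≤ end_)) := by
        rcases hB with ⟨⟨k, v⟩, hkv, hin | hsp⟩ | ⟨k, hk, hin⟩
        · left; rw [cnWhile_size_pos]
          exact Or.inr ⟨k, Or.inl (List.mem_map.mpr ⟨(k, v), hkv, rfl⟩), hin.1, hin.2⟩
        · right
          have hv : sd.getD k 0 = v := PySem.Dict.getD_of_mem_items sd hkv hnd 0
          exact ⟨k, List.mem_map.mpr ⟨(k, v), hkv, rfl⟩, by rw [hv]; exact hsp⟩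
        · left; rw [cnWhile_size_pos]; exact Or.inr ⟨k, Or.inr hk, hin.1, hin.2⟩
      split_ifs with hW hS
      · rfl
      · rfl
      · exfalso
        rcases key with hk | hk
        · exact hW hk
        · exact hS ((span_foldl_size_pos sd start end_ sd.keys _).mpr (Or.inr hk))

-- ===== VERDICT (by name: the statement is the Claim_ definition above) =====
theorem check_nearby_spec : Claim_equal_check_nearby := by
  intro chrom start end_ seen _ hpre
  unfold Spec_check_nearby
  apply check_nearby_eq_alt
  cases hc : (PySem.Dict.mk seen).get? chrom with
  | none => trivial
  | some blocks =>
    simp only [Option.elim]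
    have hcontains : (PySem.Dict.mk seen).contains chrom = true := by
      rw [PySem.Dict.contains_eq_isSome_get?, hc]; rfl
    have hgetD : (PySem.Dict.mk seen).getD chrom [] = blocks :=
      PySem.Dict.getD_of_get?_eq_some _ _ hc
    have h := (hpre hcontains).2.2
    rwa [hgetD] at h
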